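-- pv_equiv track=rewrite | github.com/slalit360/scalar_practice | DSA/Hashing/min_dist_pair.py | min_dist_of_dup_naive
-- ===== SOURCE A (Python) =====
-- import math
--
-- def min_dist_of_dup_naive(A):
--     # TC : O(n^2)
--     # SC : O(1)
--     mins = math.inf
--     n = len(A)
--
--     for i in range(n):
--         for j in range(i + 1, n):
--             if A[i] == A[j]:
--                 mins = min(mins, abs(j - i))
--
--     if mins == math.inf:
--         return -1
--     else:
--         return mins
-- ===== SOURCE B (Python) =====
-- def min_dist_of_dup_naive(A):
--     # one pass: remember the last index where each value was seen
--     last = {}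
--     best = -1
--     for i, x in enumerate(A):
--         if x in last:
--             d = i - last[x]
--             if best == -1 or d < best:
--                 best = d
--         last[x] = i
--     return best
-- ===== Notes on version B (the rewrite author's own statement) =====
-- stated objective: faster
-- what changed: Replaced the O(n^2) all-pairs scan by a single pass keeping a dict of the last-seen index per value (the closest equal pair always involves the most recent previous occurrence).
import Mathlib
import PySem

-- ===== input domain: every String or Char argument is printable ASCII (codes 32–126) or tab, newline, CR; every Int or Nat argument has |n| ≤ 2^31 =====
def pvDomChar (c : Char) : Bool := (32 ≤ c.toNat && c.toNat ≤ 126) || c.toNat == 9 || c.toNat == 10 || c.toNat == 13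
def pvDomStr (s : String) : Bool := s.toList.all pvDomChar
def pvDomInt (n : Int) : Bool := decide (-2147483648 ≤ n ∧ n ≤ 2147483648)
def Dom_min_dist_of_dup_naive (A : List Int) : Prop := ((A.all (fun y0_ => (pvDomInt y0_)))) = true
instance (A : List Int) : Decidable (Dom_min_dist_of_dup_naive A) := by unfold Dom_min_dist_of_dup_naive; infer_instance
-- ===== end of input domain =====

-- B replaces A's O(n^2) all-pairs scan by a single pass with a last-seen-index dict (objective: faster).

-- ===== PORT A =====
def min_dist_of_dup_naive (A : List Int) : Int :=
  let n : Int := A.length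
  let mins : Option Int :=
    (PySem.List.pyRange 0 n 1).foldl
      (fun (mins : Option Int) i =>
        (PySem.List.pyRange (i + 1) n 1).foldl
          (fun (mins : Option Int) j =>
            if PySem.List.pyGet? A i = PySem.List.pyGet? A j then
              some (match mins with
                    | none => |j - i|
                    | some m => min m |j - i|)
            else mins)
          mins)
      none
  match mins with
  | none => -1
  | some m => m

-- ===== PORT B =====
def min_dist_of_dup_naive_alt (A : List Int) : Int :=
  let s :=
    (PySem.List.enumerate A).foldl
      (fun (s : PySem.Dict Int Int × Int) (p : Int × Int) =>
        let best :=
          match s.1.get? p.2 with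
          | some li =>
              let d := p.1 - li
              if s.2 = -1 ∨ d < s.2 then d else s.2
          | none => s.2
        (s.1.insert p.2 p.1, best))
      (PySem.Dict.empty, -1)
  s.2

-- ===== PRECONDITION & SPEC =====
def Spec_min_dist_of_dup_naive (A : List Int) (out : Int) : Prop := out = min_dist_of_dup_naive_alt A
instance (A : List Int) (out : Int) : Decidable (Spec_min_dist_of_dup_naive A out) := by unfold Spec_min_dist_of_dup_naive; infer_instance

-- ===== CLAIM (what is proved, stated in full; the proofs are below) =====
def Claim_equal_min_dist_of_dup_naive : Prop := ∀ (A : List Int), Dom_min_dist_of_dup_naive A → Spec_min_dist_of_dup_naive A (min_dist_of_dup_naive A)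

-- ===== LEMMAS AND PROOFS =====

-- render the running minimum: none (python's math.inf untouched) ↦ -1
def pvRender : Option Int → Int
  | none => -1
  | some m => m

def pvOminStep (m : Option Int) (d : Int) : Option Int :=
  some (match m with | none => d | some x => min x d)

-- last index of v in l, if any
def pvLastIdx : List Int → Int → Option Nat
  | [], _ => none
  | a :: l, v =>
    match pvLastIdx l v with
    | some k => some (k + 1)
    | none => if a = v then some 0 else none

-- A's multiset of pair distances, in A's iteration order
def pvLA (A : List Int) : List Int :=
  (PySem.List.pyRange 0 (A.length : Int) 1).flatMap
    (fun i => (PySem.List.pyRange (i + 1) (A.length : Int) 1).filterMap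
      (fun j => if PySem.List.pyGet? A i = PySem.List.pyGet? A j then some |j - i| else none))

-- B's candidate distances: position j to the last earlier occurrence of A[j]
def pvLB (A : List Int) : List Int :=
  (List.range A.length).filterMap
    (fun (j : Nat) => Option.map (fun (k : Nat) => (j : Int) - (k : Int)) (pvLastIdx (A.take j) (A.getD j 0)))

-- the loop step of B's fold (named for the proofs)
def pvStep (s : PySem.Dict Int Int × Int) (p : Int × Int) : PySem.Dict Int Int × Int :=
  let best :=
    match s.1.get? p.2 with
    | some li =>
        let d := p.1 - li
        if s.2 = -1 ∨ d < s.2 then d else s.2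
    | none => s.2
  (s.1.insert p.2 p.1, best)

def pvFoldB (A : List Int) : PySem.Dict Int Int × Int :=
  (PySem.List.enumerate A).foldl pvStep (PySem.Dict.empty, -1)

theorem pvAlt_eq (A : List Int) : min_dist_of_dup_naive_alt A = (pvFoldB A).2 := rfl

-- ominStep folds compute List.min?
theorem pvOmin_some (l : List Int) (a : Int) :
    l.foldl pvOminStep (some a) = some (l.foldl min a) := by
  induction l generalizing a with
  | nil => rfl
  | cons x t ih => simp [List.foldl, pvOminStep, ih]

theorem pvOmin_none (l : List Int) : l.foldl pvOminStep none = l.min? := by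
  cases l with
  | nil => rfl
  | cons x t =>
    rw [List.min?_cons']
    simp [List.foldl, pvOminStep, pvOmin_some]

-- guarded min-fold = min-fold over the filterMap
theorem pvFold_filter (c : Int → Prop) [DecidablePred c] (f : Int → Int)
    (L : List Int) (m0 : Option Int) :
    L.foldl (fun m j => if c j then pvOminStep m (f j) else m) m0
      = (L.filterMap (fun j => if c j then some (f j) else none)).foldl pvOminStep m0 := by
  induction L generalizing m0 with
  | nil => rfl
  | cons x t ih => by_cases h : c x <;> simp [List.foldl, h, ih]

-- A computes the min of its pair-distance list
theorem pvA_char (A : List Int) : min_dist_of_dup_naive A = pvRender (pvLA A).min? := by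
  unfold min_dist_of_dup_naive pvLA
  rw [← pvOmin_none]
  rw [List.foldl_flatMap]
  have h : ∀ (m0 : Option Int) (i : Int),
      (PySem.List.pyRange (i + 1) (A.length : Int) 1).foldl
        (fun (mins : Option Int) j =>
          if PySem.List.pyGet? A i = PySem.List.pyGet? A j then
            some (match mins with
                  | none => |j - i|
                  | some m => min m |j - i|)
          else mins) m0
      = ((PySem.List.pyRange (i + 1) (A.length : Int) 1).filterMap
          (fun j => if PySem.List.pyGet? A i = PySem.List.pyGet? A j then some |j - i| else none)).foldl
          pvOminStep m0 := by
    intro m0 i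
    exact pvFold_filter (fun j => PySem.List.pyGet? A i = PySem.List.pyGet? A j) (fun j => |j - i|) _ m0
  simp only [h]
  rfl

-- pvLastIdx facts
theorem pvLastIdx_lt {l : List Int} {v : Int} {k : Nat} (h : pvLastIdx l v = some k) :
    k < l.length := by
  induction l generalizing k with
  | nil => simp [pvLastIdx] at h
  | cons a t ih =>
    simp only [pvLastIdx] at h
    cases hres : pvLastIdx t v with
    | some m => rw [hres] at h; simp at h; have := ih hres; simp [List.length]; omega
    | none =>
      rw [hres] at h
      by_cases ha : a = v <;> simp [ha] at h <;> simp [List.length] <;> omega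

theorem pvLastIdx_get {l : List Int} {v : Int} {k : Nat} (h : pvLastIdx l v = some k) :
    l[k]? = some v := by
  induction l generalizing k with
  | nil => simp [pvLastIdx] at h
  | cons a t ih =>
    simp only [pvLastIdx] at h
    cases hres : pvLastIdx t v with
    | some m =>
      rw [hres] at h; simp at h
      subst h
      simpa using ih hres
    | none =>
      rw [hres] at h
      by_cases ha : a = v <;> simp [ha] at h
      subst h; simp [ha]

theorem pvLastIdx_ge {l : List Int} {v : Int} {i : Nat} (h : l[i]? = some v) :
    ∃ k, pvLastIdx l v = some k ∧ i ≤ k := by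
  induction l generalizing i with
  | nil => simp at h
  | cons a t ih =>
    cases i with
    | zero =>
      simp at h
      subst h
      simp only [pvLastIdx]
      cases hres : pvLastIdx t a with
      | some m => exact ⟨m + 1, rfl, by omega⟩
      | none => exact ⟨0, by simp, by omega⟩
    | succ n =>
      simp at h
      obtain ⟨k, hk, hle⟩ := ih h
      exact ⟨k + 1, by simp [pvLastIdx, hk], by omega⟩

theorem pvLastIdx_snoc (l : List Int) (x v : Int) :
    pvLastIdx (l ++ [x]) v = if v = x then some l.length else pvLastIdx l v := by
  induction l with
  | nil =>
    by_cases h : v = x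
    · subst h; simp [pvLastIdx]
    · simp [pvLastIdx, h, Ne.symm h]
  | cons a t ih =>
    simp only [List.cons_append, pvLastIdx, ih]
    by_cases h : v = x
    · simp [h, List.length]
    · simp [h]

-- every pvLB element is positive
theorem pvLB_pos (A : List Int) : ∀ d ∈ pvLB A, 0 < d := by
  intro d hd
  simp only [pvLB, List.mem_filterMap, List.mem_range, Option.map_eq_some_iff] at hd
  obtain ⟨j, hj, k, hk, rfl⟩ := hd
  have hlt := pvLastIdx_lt hk
  simp [List.length_take] at hlt
  omega

-- min? over a snoc
theorem pvMin?_snoc (l : List Int) (b : Int) :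
    (l ++ [b]).min? = some (match l.min? with | none => b | some a => min a b) := by
  cases l with
  | nil => simp [List.min?_cons']
  | cons x t =>
    rw [List.cons_append, List.min?_cons', List.min?_cons', List.foldl_append]
    simp [List.foldl]

-- pvLB over a snoc
theorem pvLB_snoc (l : List Int) (x : Int) :
    pvLB (l ++ [x])
      = pvLB l ++ (Option.map (fun k : Nat => (l.length : Int) - (k : Int)) (pvLastIdx l x)).toList := by
  unfold pvLB
  rw [List.length_append]
  simp only [List.length_singleton, List.range_succ, List.filterMap_append]
  congr 1
  · apply List.filterMap_congr
    intro j hj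
    simp at hj
    rw [List.take_append_of_le_length (by omega), List.getD_eq_getElem?_getD,
        List.getElem?_append_left (by omega), ← List.getD_eq_getElem?_getD]
  · simp only [List.filterMap_cons, List.filterMap_nil]
    rw [List.take_left' rfl]
    have hx : (l ++ [x]).getD l.length 0 = x := by
      rw [List.getD_eq_getElem?_getD, List.getElem?_append_right (by omega)]
      simp
    rw [hx]
    cases hli : pvLastIdx l x <;> simp

-- the invariant of B's one-pass loop
theorem pvB_inv (A : List Int) :
    (∀ v, (pvFoldB A).1.get? v = Option.map (fun k : Nat => (k : Int)) (pvLastIdx A v))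
    ∧ (pvFoldB A).2 = pvRender (pvLB A).min? := by
  induction A using List.reverseRecOn with
  | nil =>
    constructor
    · intro v; simp [pvFoldB, PySem.List.enumerate, pvLastIdx, PySem.Dict.get?_empty]
    · simp [pvFoldB, PySem.List.enumerate, pvLB, pvRender]
  | append_singleton l x ih =>
    obtain ⟨ihd, ihb⟩ := ih
    have hfold : pvFoldB (l ++ [x]) = pvStep (pvFoldB l) ((l.length : Int), x) := by
      unfold pvFoldB
      rw [PySem.List.enumerate_append, List.foldl_append]
      simp [PySem.List.enumerate_cons, PySem.List.enumerate_nil]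
    constructor
    · intro v
      rw [hfold]
      simp only [pvStep, PySem.Dict.get?_insert]
      rw [pvLastIdx_snoc]
      by_cases h : v = x <;> simp [h, ihd]
    · rw [hfold]
      simp only [pvStep]
      rw [ihd x, pvLB_snoc, ihb]
      cases hli : pvLastIdx l x with
      | none => simp [pvRender]
      | some k =>
        simp only [Option.map_some, Option.toList_some]
        rw [pvMin?_snoc]
        cases hmin : (pvLB l).min? with
        | none => simp [pvRender]
        | some m =>
          have hm : m ∈ pvLB l := ((List.min?_eq_some_iff).mp hmin).1
          have hmpos : 0 < m := pvLB_pos l m hm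
          have hne : ¬ (m = -1) := by omega
          by_cases hd : (l.length : Int) - (k : Int) < m
          · simp [pvRender, hne, hd, min_eq_right (le_of_lt hd)]
          · simp [pvRender, hne, hd, min_eq_left (by omega : m ≤ (l.length : Int) - (k : Int))]

-- membership characterizations
theorem pvLA_mem (A : List Int) (d : Int) :
    d ∈ pvLA A ↔ ∃ i j : Nat, i < j ∧ j < A.length ∧ A[i]? = A[j]? ∧ d = (j : Int) - i := by
  unfold pvLA
  simp only [List.mem_flatMap, List.mem_filterMap, PySem.List.mem_pyRange_one]
  constructor
  · rintro ⟨i, ⟨hi0, hin⟩, j, ⟨hij, hjn⟩, hcond⟩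
    split at hcond
    case isTrue heq =>
      simp only [Option.some.injEq] at hcond
      refine ⟨i.toNat, j.toNat, by omega, by omega, ?_, ?_⟩
      · rw [PySem.List.pyGet?_of_nonneg A hi0, PySem.List.pyGet?_of_nonneg A (by omega : (0:Int) ≤ j)] at heq
        exact heq
      · rw [← hcond, abs_of_pos (by omega)]; omega
    case isFalse => simp at hcond
  · rintro ⟨i, j, hij, hjn, heq, rfl⟩
    refine ⟨(i : Int), ⟨by omega, by push_cast; omega⟩, (j : Int), ⟨by omega, by push_cast; omega⟩, ?_⟩
    rw [PySem.List.pyGet?_natCast A i, PySem.List.pyGet?_natCast A j, heq, if_pos rfl,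
        abs_of_pos (by push_cast; omega)]

theorem pvLB_mem (A : List Int) (d : Int) :
    d ∈ pvLB A ↔ ∃ (j k : Nat), j < A.length ∧ pvLastIdx (A.take j) (A.getD j 0) = some k
      ∧ d = (j : Int) - k := by
  simp only [pvLB, List.mem_filterMap, List.mem_range, Option.map_eq_some_iff]
  constructor
  · rintro ⟨j, hj, k, hk, rfl⟩; exact ⟨j, k, hj, hk, rfl⟩
  · rintro ⟨j, k, hj, hk, rfl⟩; exact ⟨j, hj, k, hk, rfl⟩

-- two lists with mutually dominating members have the same min?
theorem pvMinEq (l1 l2 : List Int)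
    (h1 : ∀ b ∈ l2, ∃ a ∈ l1, a ≤ b) (h2 : ∀ a ∈ l1, ∃ b ∈ l2, b ≤ a) :
    l1.min? = l2.min? := by
  cases hm1 : l1.min? with
  | none =>
    rw [List.min?_eq_none_iff] at hm1
    subst hm1
    cases hm2 : l2.min? with
    | none => rfl
    | some m =>
      have hm := ((List.min?_eq_some_iff).mp hm2).1
      obtain ⟨a, ha, _⟩ := h1 m hm
      simp at ha
  | some m1 =>
    obtain ⟨hm1mem, hm1le⟩ := (List.min?_eq_some_iff).mp hm1
    cases hm2 : l2.min? with
    | none =>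
      rw [List.min?_eq_none_iff] at hm2
      subst hm2
      obtain ⟨b, hb, _⟩ := h2 m1 hm1mem
      simp at hb
    | some m2 =>
      obtain ⟨hm2mem, hm2le⟩ := (List.min?_eq_some_iff).mp hm2
      congr 1
      obtain ⟨a, ha, hale⟩ := h1 m2 hm2mem
      obtain ⟨b, hb, hble⟩ := h2 m1 hm1mem
      have := hm1le a ha
      have := hm2le b hb
      omega

theorem pvMin_eq (A : List Int) : (pvLA A).min? = (pvLB A).min? := by
  apply pvMinEq
  · intro b hb
    rw [pvLB_mem] at hb
    obtain ⟨j, k, hj, hk, rfl⟩ := hb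
    refine ⟨(j : Int) - k, ?_, le_refl _⟩
    rw [pvLA_mem]
    have hklt : k < j := by
      have := pvLastIdx_lt hk
      simp [List.length_take] at this
      omega
    have hgetk := pvLastIdx_get hk
    rw [List.getElem?_take, if_pos hklt] at hgetk
    refine ⟨k, j, hklt, hj, ?_, rfl⟩
    rw [hgetk, List.getD_eq_getElem?_getD, List.getElem?_eq_getElem hj]
    simp
  · intro a ha
    rw [pvLA_mem] at ha
    obtain ⟨i, j, hij, hjn, heq, rfl⟩ := ha
    have hji : A[j]? = some A[j] := List.getElem?_eq_getElem hjn
    have htake : (A.take j)[i]? = some A[j] := by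
      rw [List.getElem?_take, if_pos hij, heq, hji]
    obtain ⟨k, hk, hik⟩ := pvLastIdx_ge htake
    refine ⟨(j : Int) - k, ?_, by omega⟩
    rw [pvLB_mem]
    refine ⟨j, k, hjn, ?_, rfl⟩
    rw [List.getD_eq_getElem?_getD, hji]
    exact hk

-- ===== VERDICT (by name: the statement is the Claim_ definition above) =====
theorem min_dist_of_dup_naive_spec : Claim_equal_min_dist_of_dup_naive := by
  intro A _
  show min_dist_of_dup_naive A = min_dist_of_dup_naive_alt A
  rw [pvA_char, pvAlt_eq, (pvB_inv A).2, pvMin_eq]
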